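-- pv_equiv track=rewrite | github.com/Juantamayo26/Train | ICPC/ukiepc2020problems/balancedbreakdown/submissions/accepted/michael.py | rem_pal
-- ===== SOURCE A (Python) =====
-- def rem_pal(m):
--     if m==0:
--         return []
--     ml = list(str(m))
--     nl = ['0']*len(ml)
--     for i in range(len(ml)//2+len(ml)%2):
--         nl[i] = ml[i]
--         nl[len(ml)-1-i] = ml[i]
--         if int("".join(nl))>int(m):
--             if i==0 and ml[i]=='1':
--                 nl = list(str(m-1))
--             else:
--                 nl[i]           = str(int(ml[i])-1)
--                 nl[len(ml)-1-i] = str(int(ml[i])-1)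
--                 for j in range(i+1, len(ml)//2+len(ml)%2):
--                     nl[j] = '9'
--                     nl[len(ml)-1-j] = '9'
--             break
--     return [int("".join(nl))]+rem_pal(m-int("".join(nl)))
-- ===== SOURCE B (Python) =====
-- def rem_pal(m):
--     out = []
--     while m != 0:
--         s = str(m)
--         n = len(s)
--         h = n // 2 + n % 2
--         bad = -1
--         for i in range(h):
--             pre = s[:i + 1]
--             rev = pre[::-1]
--             t = pre + '0' * (n - 2 * i - 2) + (rev[1:] if 2 * i == n - 1 else rev)
--             if int(t) > m:
--                 bad = i
--                 break
--         if bad == -1: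
--             half = s[:h]
--             rh = half[::-1]
--             p = int(half + (rh[1:] if n % 2 == 1 else rh))
--         elif bad == 0 and s[0] == '1':
--             p = int(str(m - 1))
--         else:
--             i = bad
--             left = s[:i]
--             d = str(int(s[i]) - 1)
--             if 2 * i == n - 1:
--                 p = int(left + d + left[::-1])
--             else:
--                 p = int(left + d + '9' * (n - 2 * i - 2) + d + left[::-1])
--         out.append(p)
--         m -= p
--     return out
-- ===== Notes on version B (the rewrite author's own statement) =====
-- stated objective: alternative
-- what changed: A recurses and, per call, mutates a preallocated digit array in place (pair-by-pair fill with an in-loop break and a trailing nine-fill loop); B is an iterative while-loop whose palindrome finder first locates the first prefix index whose mirror overshoots and then assembles the palindrome functionally from string slices (prefix + zeros/nines + reversed prefix), with no mutation and no recursion.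
import Mathlib
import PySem

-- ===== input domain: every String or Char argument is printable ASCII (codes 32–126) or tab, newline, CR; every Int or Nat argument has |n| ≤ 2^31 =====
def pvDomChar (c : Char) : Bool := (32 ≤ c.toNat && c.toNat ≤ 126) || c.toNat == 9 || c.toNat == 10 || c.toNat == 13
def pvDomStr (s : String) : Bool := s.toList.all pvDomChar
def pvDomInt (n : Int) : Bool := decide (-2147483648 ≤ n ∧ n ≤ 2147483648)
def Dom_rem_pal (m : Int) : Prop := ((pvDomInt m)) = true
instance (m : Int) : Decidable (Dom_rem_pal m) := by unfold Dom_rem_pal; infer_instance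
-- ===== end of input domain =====

-- B replaces A's recursion and in-place digit-array surgery by an iterative loop whose
-- palindrome finder assembles each candidate from string slices (prefix + zeros/nines +
-- mirrored prefix); objective: alternative (same cost, different decomposition).

-- ===== PORT A =====

-- "".join(nl) for a Python list of strings
def pvJoin (nl : List (List Char)) : List Char := PySem.Chars.join [] nl

-- list(str(x)): a Python list of 1-character strings
def pvSing (s : List Char) : List (List Char) := s.map (fun c => [c])

-- A's inner 9-filling loop: `for j in range(i+1, h): nl[j]='9'; nl[n-1-j]='9'`
-- (r = number of iterations left, j = current index)
def pvFillA (n : Nat) : List (List Char) → Nat → Nat → List (List Char)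
  | nl, 0, _ => nl
  | nl, r + 1, j =>
    let nl1 := PySem.List.pySetD nl (j : Int) ['9']
    let nl2 := PySem.List.pySetD nl1 ((n : Int) - 1 - (j : Int)) ['9']
    pvFillA n nl2 r (j + 1)

-- A's main loop `for i in range(len(ml)//2+len(ml)%2): ...` with its break;
-- returns the final nl, or none where Python's int() raises ValueError
def pvScanA (ml : List (List Char)) (n : Nat) (m : Int) :
    Nat → Nat → List (List Char) → Option (List (List Char))
  | 0, _, nl => some nl
  | r + 1, i, nl =>
    let c := PySem.List.pyGetD ml (i : Int) []
    let nl1 := PySem.List.pySetD nl (i : Int) c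
    let nl2 := PySem.List.pySetD nl1 ((n : Int) - 1 - (i : Int)) c
    match PySem.Int.ofChars? (pvJoin nl2) with   -- int("".join(nl)) > int(m); int(m) = m
    | none => none
    | some v =>
      if v > m then
        if i = 0 ∧ c = ['1'] then
          some (pvSing (PySem.Int.toChars (m - 1)))   -- nl = list(str(m-1))
        else
          match PySem.Int.ofChars? c with             -- int(ml[i])
          | none => none
          | some dv =>
            let d := PySem.Int.toChars (dv - 1)       -- str(int(ml[i])-1)
            let nl3 := PySem.List.pySetD nl2 (i : Int) d
            let nl4 := PySem.List.pySetD nl3 ((n : Int) - 1 - (i : Int)) d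
            some (pvFillA n nl4 r (i + 1))            -- r = h - 1 - i iterations
      else pvScanA ml n m r (i + 1) nl2

-- one call body of A: the value int("".join(nl)) it extracts (none = exception)
def pvStepA (m : Int) : Option Int :=
  let ml := pvSing (PySem.Int.toChars m)              -- ml = list(str(m))
  let n := ml.length
  match pvScanA ml n m (n / 2 + n % 2) 0 (List.replicate n ['0']) with
  | none => none
  | some nl => PySem.Int.ofChars? (pvJoin nl)

-- A's recursion rem_pal(m) = [p] + rem_pal(m - p), totalized with fuel
def pvGoA : Nat → Int → List Int
  | 0, _ => []
  | k + 1, m =>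
    if m = 0 then []
    else
      match pvStepA m with
      | none => []                                    -- Python raises here (outside Pre_)
      | some p => p :: pvGoA k (m - p)

def rem_pal (m : Int) : List Int := pvGoA (m.toNat + 1) m

-- ===== PORT B =====

-- B's scan `for i in range(h): ... if int(t) > m: bad = i; break`:
-- some (some i) = first bad index, some none = no bad index, none = int() raised
def pvScanB (s : List Char) (n : Nat) (m : Int) : Nat → Nat → Option (Option Nat)
  | 0, _ => some none
  | r + 1, i =>
    let pre := PySem.List.slice s none (some ((i : Int) + 1))        -- s[:i+1]
    let rev := pre.reverse                                           -- pre[::-1] (slice?_none_none_neg_one)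
    let t := pre ++ List.replicate (((n : Int) - 2 * (i : Int) - 2).toNat) '0' ++
        (if 2 * (i : Int) = (n : Int) - 1 then rev.drop 1 else rev)  -- rev[1:] if middle
    match PySem.Int.ofChars? t with                                  -- int(t)
    | none => none
    | some v => if v > m then some (some i) else pvScanB s n m r (i + 1)

-- B's if/elif/else on bad, producing the palindrome p
def pvFinishB (s : List Char) (n h : Nat) (m : Int) : Option (Option Nat) → Option Int
  | none => none
  | some none =>
    let half := PySem.List.slice s none (some (h : Int))             -- s[:h]
    let rh := half.reverse
    PySem.Int.ofChars? (half ++ (if n % 2 = 1 then rh.drop 1 else rh))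
  | some (some i) =>
    if i = 0 ∧ PySem.List.pyGetD s (0 : Int) ' ' = '1' then          -- bad == 0 and s[0] == '1'
      PySem.Int.ofChars? (PySem.Int.toChars (m - 1))                 -- int(str(m-1))
    else
      let left := PySem.List.slice s none (some (i : Int))           -- s[:i]
      match PySem.Int.ofChars? [PySem.List.pyGetD s (i : Int) ' '] with  -- int(s[i])
      | none => none
      | some dv =>
        let d := PySem.Int.toChars (dv - 1)                          -- str(int(s[i])-1)
        if 2 * (i : Int) = (n : Int) - 1 then
          PySem.Int.ofChars? (left ++ d ++ left.reverse)
        else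
          PySem.Int.ofChars? (left ++ d ++
            List.replicate (((n : Int) - 2 * (i : Int) - 2).toNat) '9' ++ d ++ left.reverse)

-- one iteration of B's while loop: the palindrome p it appends (none = exception)
def pvStepB (m : Int) : Option Int :=
  let s := PySem.Int.toChars m                       -- s = str(m)
  let n := s.length
  let h := n / 2 + n % 2
  pvFinishB s n h m (pvScanB s n m h 0)

-- B's while loop, totalized with fuel
def pvGoB : Nat → Int → List Int
  | 0, _ => []
  | k + 1, m =>
    if m ≠ 0 then
      match pvStepB m with
      | none => []                                    -- Python raises here (outside Pre_)
      | some p => p :: pvGoB k (m - p)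
    else []

def rem_pal_alt (m : Int) : List Int := pvGoB (m.toNat + 1) m

-- ===== PRECONDITION & SPEC =====

-- A raises ValueError on every negative m (str(m) starts with '-', which the mirrored
-- digit string feeds back into int()); Pre_ keeps exactly the m where A returns.
def Pre_rem_pal (m : Int) : Prop := 0 ≤ m
instance (m : Int) : Decidable (Pre_rem_pal m) := by unfold Pre_rem_pal; infer_instance

def pvWitness_rem_pal : Int := (1234)

def Spec_rem_pal (m : Int) (out : List Int) : Prop := out = rem_pal_alt m
instance (m : Int) (out : List Int) : Decidable (Spec_rem_pal m out) := by
  unfold Spec_rem_pal; infer_instance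

-- ===== CLAIM =====
def Claim_equal_rem_pal : Prop := ∀ (m : Int), Dom_rem_pal m → Pre_rem_pal m → Spec_rem_pal m (rem_pal m)

-- ===== LEMMAS AND PROOFS =====

-- join/flatten bridges
lemma pvJoin_eq_flatten (l : List (List Char)) : pvJoin l = l.flatten := by
  induction l with
  | nil => rfl
  | cons x t ih =>
    cases t with
    | nil => simp [pvJoin, PySem.Chars.join_singleton]
    | cons y tt =>
      simp only [pvJoin] at *
      rw [PySem.Chars.join_cons_cons]
      simp [ih]

lemma pvSing_flatten (s : List Char) : (pvSing s).flatten = s := by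
  induction s with
  | nil => rfl
  | cons c t ih => simp [pvSing] at *; simp [ih]

lemma pvJoin_pvSing (s : List Char) : pvJoin (pvSing s) = s := by
  rw [pvJoin_eq_flatten, pvSing_flatten]

lemma pvSing_reverse (s : List Char) : (pvSing s).reverse = pvSing s.reverse := by
  simp [pvSing]

-- str(m) is never the empty string
lemma pvToDigits_ne_nil (b n : Nat) : Nat.toDigits b n ≠ [] := by
  have key : ∀ f n (l : List Char), l.length ≤ (Nat.toDigitsCore b f n l).length := by
    intro f
    induction f with
    | zero => intro n l; simp [Nat.toDigitsCore]
    | succ f ih =>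
      intro n l
      simp only [Nat.toDigitsCore]
      split
      · simp
      · exact le_trans (by simp) (ih (n / b) (Nat.digitChar (n % b) :: l))
  intro h
  have h1 : (1 : Nat) ≤ (Nat.toDigitsCore b (n + 1) n []).length := by
    simp only [Nat.toDigitsCore]
    split
    · simp
    · exact le_trans (by simp) (key n (n / b) [Nat.digitChar (n % b)])
  rw [show Nat.toDigitsCore b (n + 1) n [] = Nat.toDigits b n from rfl, h] at h1
  simp at h1

lemma pvToChars_ne_nil (m : Int) : PySem.Int.toChars m ≠ [] := by
  unfold PySem.Int.toChars
  split
  · simp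
  · exact pvToDigits_ne_nil 10 m.toNat

-- set into a concatenation, at the head of the right part
lemma pvSet_split (u w : List (List Char)) (v : List Char) (k : Nat) (hk : k = u.length) :
    (u ++ w).set k v = u ++ w.set 0 v := by subst hk; simp

-- A's nl at the start of iteration i: digits of s mirrored on the first i positions,
-- '0' in the middle (min handles the very last state of an odd-length scan)
def pvState (s : List Char) (n i : Nat) : List (List Char) :=
  pvSing (s.take i) ++ List.replicate (n - 2 * i) ['0'] ++
    (pvSing (s.take (min i (n - i)))).reverse

def pvProcessA : Option (List (List Char)) → Option Int
  | none => none
  | some nl => PySem.Int.ofChars? (pvJoin nl)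

lemma pvJoin_state (s : List Char) (n i : Nat) :
    pvJoin (pvState s n i) =
      s.take i ++ List.replicate (n - 2 * i) '0' ++ (s.take (min i (n - i))).reverse := by
  simp [pvState, pvJoin_eq_flatten, pvSing_reverse, pvSing_flatten]

lemma pvRevDrop (s : List Char) (h : Nat) (hh : h ≤ s.length) :
    (s.take h).reverse.drop 1 = (s.take (h - 1)).reverse := by
  rw [List.drop_one, List.tail_reverse]
  congr 1
  rw [List.dropLast_eq_take]
  simp [List.take_take, List.length_take]
  omega


lemma pvSing_take_succ (s : List Char) (i : Nat) (hi : i < s.length) :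
    pvSing (s.take (i+1)) = pvSing (s.take i) ++ [[s[i]]] := by
  unfold pvSing
  rw [List.take_succ_eq_append_getElem hi, List.map_append]
  simp

lemma pvState_step (s : List Char) (i : Nat) (hi : 2 * i < s.length) :
    ((pvState s s.length i).set i [s[i]'(by omega)]).set (s.length - 1 - i) [s[i]'(by omega)]
      = pvState s s.length (i + 1) := by
  have hU : (pvSing (s.take i)).length = i := by simp [pvSing]; omega
  have hmin : min i (s.length - i) = i := by omega
  by_cases hmid : 2 * i + 1 = s.length
  · have h1 : s.length - 2 * i = 1 := by omega
    unfold pvState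
    rw [hmin, h1, show min (i+1) (s.length - (i+1)) = i from by omega,
        show s.length - 2 * (i+1) = 0 from by omega]
    rw [show pvSing (s.take i) ++ List.replicate 1 ['0'] ++ (pvSing (s.take i)).reverse
        = pvSing (s.take i) ++ (['0'] :: (pvSing (s.take i)).reverse) from by simp]
    rw [pvSet_split _ _ _ _ hU.symm, List.set_cons_zero]
    rw [show s.length - 1 - i = i from by omega]
    rw [pvSet_split _ _ _ _ hU.symm, List.set_cons_zero]
    rw [pvSing_take_succ s i (by omega)]
    simp
  · have h2 : 2 * i + 2 ≤ s.length := by omega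
    unfold pvState
    rw [hmin, show min (i+1) (s.length - (i+1)) = i + 1 from by omega,
        show s.length - 2 * (i+1) = s.length - 2*i - 2 from by omega]
    rw [show s.length - 2*i = (s.length - 2*i - 2) + 1 + 1 from by omega]
    rw [List.replicate_succ]
    rw [List.replicate_succ']
    rw [show pvSing (s.take i) ++ (['0'] :: (List.replicate (s.length - 2*i - 2) ['0'] ++ [['0']]))
          ++ (pvSing (s.take i)).reverse
        = pvSing (s.take i) ++ (['0'] :: (List.replicate (s.length - 2*i - 2) ['0'] ++ [['0']]
          ++ (pvSing (s.take i)).reverse)) from by simp]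
    rw [pvSet_split _ _ _ _ hU.symm, List.set_cons_zero]
    rw [show pvSing (s.take i) ++ ([s[i]] :: (List.replicate (s.length - 2*i - 2) ['0'] ++ [['0']]
          ++ (pvSing (s.take i)).reverse))
        = (pvSing (s.take i) ++ [s[i]] :: List.replicate (s.length - 2*i - 2) ['0'])
          ++ (['0'] :: (pvSing (s.take i)).reverse) from by simp]
    rw [pvSet_split _ _ _ _ (by simp [hU]; omega), List.set_cons_zero]
    rw [pvSing_take_succ s i (by omega)]
    simp

lemma pvFill_spec : ∀ (r : Nat) (u mid w : List (List Char)),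
    w.length = u.length →
    (mid.length = 2 * r ∨ (mid.length + 1 = 2 * r ∧ 1 ≤ r)) →
    pvFillA (u.length + mid.length + w.length) (u ++ mid ++ w) r u.length
      = u ++ List.replicate mid.length ['9'] ++ w := by
  intro r
  induction r with
  | zero =>
    intro u mid w hw hm
    have : mid = [] := by
      rcases hm with h | ⟨h, h1⟩
      · exact List.eq_nil_of_length_eq_zero (by omega)
      · omega
    subst this
    simp [pvFillA]
  | succ r ih =>
    intro u mid w hw hm
    have hmidpos : 1 ≤ mid.length := by omega
    obtain ⟨x, rest, rfl⟩ : ∃ x rest, mid = x :: rest := by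
      cases mid with
      | nil => simp at hmidpos
      | cons a b => exact ⟨a, b, rfl⟩
    simp only [pvFillA]
    rw [PySem.List.pySetD_natCast]
    rw [show u ++ (x :: rest) ++ w = u ++ (x :: (rest ++ w)) from by simp]
    rw [pvSet_split _ _ _ _ rfl, List.set_cons_zero]
    rcases List.eq_nil_or_concat rest with hrest | ⟨core, y, rfl⟩
    · subst hrest
      have hr0 : r = 0 := by simp at hm; omega
      subst hr0
      have hidx : ((u.length + (x :: ([]:List (List Char))).length + w.length : Nat) : Int) - 1
          - (u.length : Int) = ((u.length : Nat) : Int) := by simp; omega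
      rw [hidx, PySem.List.pySetD_natCast]
      rw [pvSet_split _ _ _ _ rfl, List.set_cons_zero]
      simp [pvFillA]
    · simp only [List.concat_eq_append] at *
      have hidx : ((u.length + (x :: (core ++ [y])).length + w.length : Nat) : Int) - 1
          - (u.length : Int) = (((u.length + 1 + core.length : Nat)) : Int) := by simp; omega
      rw [hidx, PySem.List.pySetD_natCast]
      rw [show u ++ (['9'] :: ((core ++ [y]) ++ w)) = (u ++ ['9'] :: core) ++ (y :: w) from by simp]
      rw [pvSet_split _ _ _ _ (by simp; omega), List.set_cons_zero]
      have hkey := ih (u ++ [['9']]) core (['9'] :: w) (by simp; omega)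
        (by rcases hm with h | ⟨h, h1⟩
            · left; simp at h ⊢; omega
            · right
              constructor
              · simp at h ⊢; omega
              · simp at h; omega)
      rw [show (u ++ ['9'] :: core) ++ ['9'] :: w = (u ++ [['9']]) ++ core ++ (['9'] :: w)
          from by simp] at *
      rw [show u.length + (x :: (core ++ [y])).length + w.length
          = (u ++ [['9']]).length + core.length + (['9'] :: w).length from by simp; omega]
      rw [show u.length + 1 = (u ++ [['9']]).length from by simp]
      rw [hkey]
      have goal2 : List.replicate (x :: (core ++ [y])).length (['9']:List Char)
          = ['9'] :: (List.replicate core.length ['9'] ++ [['9']]) := by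
        simp [List.length_cons]
        rw [show core.length + 1 + 1 = (core.length + 1) + 1 from rfl, List.replicate_succ]
        congr 1
        rw [List.replicate_succ']
      rw [goal2]
      simp

lemma pvFill_spec' (r n : Nat) (u mid w : List (List Char)) (j : Nat)
    (hn : n = u.length + mid.length + w.length) (hj : j = u.length)
    (hw : w.length = u.length)
    (hm : mid.length = 2 * r ∨ (mid.length + 1 = 2 * r ∧ 1 ≤ r)) :
    pvFillA n (u ++ mid ++ w) r j = u ++ List.replicate mid.length ['9'] ++ w := by
  subst hn; subst hj; exact pvFill_spec r u mid w hw hm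

lemma pvAdjMid (s : List Char) (i : Nat) (d : List Char) (hmid : 2 * i + 1 = s.length) :
    ((pvState s s.length (i+1)).set i d).set (s.length - 1 - i) d
      = pvSing (s.take i) ++ (d :: (pvSing (s.take i)).reverse) := by
  have hU : (pvSing (s.take i)).length = i := by simp [pvSing]; omega
  unfold pvState
  rw [show min (i+1) (s.length - (i+1)) = i from by omega,
      show s.length - 2 * (i+1) = 0 from by omega]
  rw [pvSing_take_succ s i (by omega)]
  rw [show (pvSing (s.take i) ++ [[s[i]'(by omega)]]) ++ List.replicate 0 ['0']
        ++ (pvSing (s.take i)).reverse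
      = pvSing (s.take i) ++ ([s[i]'(by omega)] :: (pvSing (s.take i)).reverse) from by simp]
  rw [pvSet_split _ _ _ _ hU.symm, List.set_cons_zero]
  rw [show s.length - 1 - i = i from by omega]
  rw [pvSet_split _ _ _ _ hU.symm, List.set_cons_zero]

lemma pvAdjGen (s : List Char) (i : Nat) (d : List Char) (h2 : 2 * i + 2 ≤ s.length) :
    ((pvState s s.length (i+1)).set i d).set (s.length - 1 - i) d
      = (pvSing (s.take i) ++ [d]) ++ (List.replicate (s.length - 2*i - 2) ['0']
        ++ (d :: (pvSing (s.take i)).reverse)) := by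
  have hU : (pvSing (s.take i)).length = i := by simp [pvSing]; omega
  unfold pvState
  rw [show min (i+1) (s.length - (i+1)) = i + 1 from by omega,
      show s.length - 2 * (i+1) = s.length - 2*i - 2 from by omega]
  rw [pvSing_take_succ s i (by omega)]
  rw [show (pvSing (s.take i) ++ [[s[i]'(by omega)]]) ++ List.replicate (s.length - 2*i - 2) ['0']
        ++ (pvSing (s.take i) ++ [[s[i]'(by omega)]]).reverse
      = pvSing (s.take i) ++ ([s[i]'(by omega)] :: (List.replicate (s.length - 2*i - 2) ['0']
        ++ ([s[i]'(by omega)] :: (pvSing (s.take i)).reverse))) from by simp]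
  rw [pvSet_split _ _ _ _ hU.symm, List.set_cons_zero]
  rw [show pvSing (s.take i) ++ (d :: (List.replicate (s.length - 2*i - 2) ['0']
        ++ ([s[i]'(by omega)] :: (pvSing (s.take i)).reverse)))
      = (pvSing (s.take i) ++ d :: List.replicate (s.length - 2*i - 2) ['0'])
        ++ ([s[i]'(by omega)] :: (pvSing (s.take i)).reverse) from by simp]
  rw [pvSet_split _ _ _ _ (by simp [hU]; omega), List.set_cons_zero]
  simp

lemma pvScan_eq (s : List Char) (m : Int) (hs : s ≠ []) :
    ∀ (r i : Nat), i + r = s.length / 2 + s.length % 2 →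
    pvProcessA (pvScanA (pvSing s) s.length m r i (pvState s s.length i))
    = pvFinishB s s.length (s.length / 2 + s.length % 2) m (pvScanB s s.length m r i) := by
  have hn : 1 ≤ s.length := List.length_pos_iff.mpr hs
  intro r
  induction r with
  | zero =>
    intro i hri
    simp only [Nat.add_zero] at hri
    subst hri
    simp only [pvScanA, pvScanB, pvProcessA, pvFinishB]
    rw [pvJoin_state]
    congr 1
    rw [show PySem.List.slice s none (some ((s.length / 2 + s.length % 2 : Nat) : Int)) =
        s.take (s.length / 2 + s.length % 2) from PySem.List.slice_to_natCast ..]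
    by_cases hp : s.length % 2 = 1
    · rw [if_pos hp]
      rw [pvRevDrop s _ (by omega)]
      rw [show min (s.length / 2 + s.length % 2) (s.length - (s.length / 2 + s.length % 2))
          = s.length / 2 + s.length % 2 - 1 from by omega]
      rw [show s.length - 2 * (s.length / 2 + s.length % 2) = 0 from by omega]
      simp
    · rw [if_neg hp]
      rw [show min (s.length / 2 + s.length % 2) (s.length - (s.length / 2 + s.length % 2))
          = s.length / 2 + s.length % 2 from by omega]
      rw [show s.length - 2 * (s.length / 2 + s.length % 2) = 0 from by omega]
      simp
  | succ r ih =>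
    intro i hri
    have hi_n : i < s.length := by omega
    have h2i : 2 * i < s.length := by omega
    simp only [pvScanA, pvScanB]
    have hc : PySem.List.pyGetD (pvSing s) ((i : Nat) : Int) [] = [s[i]] := by
      simp [pvSing, List.getD_eq_getElem?_getD, hi_n]
    rw [hc]
    rw [PySem.List.pySetD_natCast]
    rw [show ((s.length : Nat) : Int) - 1 - ((i : Nat) : Int) = ((s.length - 1 - i : Nat) : Int)
        from by omega]
    rw [PySem.List.pySetD_natCast]
    rw [pvState_step s i h2i]
    have hpre : PySem.List.slice s none (some (((i : Nat) : Int) + 1)) = s.take (i+1) := by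
      rw [show ((i : Nat) : Int) + 1 = ((i + 1 : Nat) : Int) from by omega]
      exact PySem.List.slice_to_natCast ..
    rw [hpre]
    simp only [show (((s.length : Nat) : Int) - 2 * ((i : Nat) : Int) - 2).toNat
        = s.length - 2*i - 2 from by omega]
    have htake1 : s.length - 2 * (i + 1) = s.length - 2*i - 2 := by omega
    by_cases hmid : 2 * i + 1 = s.length
    · -- middle position: i is the exact centre of an odd-length string
      rw [if_pos (show 2 * ((i : Nat) : Int) = ((s.length : Nat) : Int) - 1 from by omega)]
      have hT : pvJoin (pvState s s.length (i+1))
          = s.take (i+1) ++ List.replicate (s.length - 2*i - 2) '0'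
            ++ (s.take (i+1)).reverse.drop 1 := by
        rw [pvJoin_state, htake1, show min (i+1) (s.length - (i+1)) = i from by omega,
            pvRevDrop s (i+1) (by omega)]
        simp
      rw [hT]
      cases hv : PySem.Int.ofChars? (s.take (i+1) ++ List.replicate (s.length - 2*i - 2) '0'
          ++ (s.take (i+1)).reverse.drop 1) with
    | none => simp [pvProcessA, pvFinishB]
    | some v =>
      simp only []
      by_cases hvm : v > m
      · rw [if_pos hvm, if_pos hvm]
        simp only [pvFinishB]
        have hg0 : PySem.List.pyGetD s (0 : Int) ' ' = s.getD 0 ' ' :=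
          PySem.List.pyGetD_zero ..
        by_cases hA : i = 0 ∧ s[i] = '1'
        · obtain ⟨hi0, h1⟩ := hA
          subst hi0
          rw [if_pos (by simp [h1]), if_pos ?side]
          case side =>
            exact ⟨rfl, by rw [hg0, List.getD_eq_getElem s ' ' (by omega)]; exact h1⟩
          simp [pvProcessA, pvJoin_pvSing]
        · rw [if_neg (by simpa using hA), if_neg ?bside]
          case bside =>
            intro hcon
            obtain ⟨hi0, h1⟩ := hcon
            subst hi0
            apply hA
            refine ⟨rfl, ?_⟩
            rw [hg0, List.getD_eq_getElem s ' ' (by omega)] at h1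
            exact h1
          rw [show PySem.List.pyGetD s ((i:Nat) : Int) ' ' = s[i] from by
            rw [PySem.List.pyGetD_natCast, List.getD_eq_getElem s ' ' hi_n]]
          cases hdv : PySem.Int.ofChars? [s[i]] with
          | none => simp [pvProcessA]
          | some dv =>
            simp only []
            have hr0 : r = 0 := by omega
            subst hr0
            rw [PySem.List.pySetD_natCast, PySem.List.pySetD_natCast]
            rw [pvAdjMid s i (PySem.Int.toChars (dv - 1)) hmid]
            rw [if_pos (show 2 * ((i : Nat) : Int) = ((s.length : Nat) : Int) - 1 from by omega)]
            rw [show PySem.List.slice s none (some ((i : Nat) : Int)) = s.take i from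
              PySem.List.slice_to_natCast ..]
            simp only [pvFillA, pvProcessA]
            congr 1
            rw [pvJoin_eq_flatten]
            simp [pvSing_reverse, pvSing_flatten]
      · rw [if_neg hvm, if_neg hvm]
        exact ih (i+1) (by omega)
    · -- generic position
      rw [if_neg (show ¬ (2 * ((i : Nat) : Int) = ((s.length : Nat) : Int) - 1) from by omega)]
      have hT : pvJoin (pvState s s.length (i+1))
          = s.take (i+1) ++ List.replicate (s.length - 2*i - 2) '0'
            ++ (s.take (i+1)).reverse := by
        rw [pvJoin_state, htake1, show min (i+1) (s.length - (i+1)) = i + 1 from by omega]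
      rw [hT]
      cases hv : PySem.Int.ofChars? (s.take (i+1) ++ List.replicate (s.length - 2*i - 2) '0'
          ++ (s.take (i+1)).reverse) with
    | none => simp [pvProcessA, pvFinishB]
    | some v =>
      simp only []
      by_cases hvm : v > m
      · rw [if_pos hvm, if_pos hvm]
        simp only [pvFinishB]
        have hg0 : PySem.List.pyGetD s (0 : Int) ' ' = s.getD 0 ' ' :=
          PySem.List.pyGetD_zero ..
        by_cases hA : i = 0 ∧ s[i] = '1'
        · obtain ⟨hi0, h1⟩ := hA
          subst hi0
          rw [if_pos (by simp [h1]), if_pos ?side2]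
          case side2 =>
            exact ⟨rfl, by rw [hg0, List.getD_eq_getElem s ' ' (by omega)]; exact h1⟩
          simp [pvProcessA, pvJoin_pvSing]
        · rw [if_neg (by simpa using hA), if_neg ?bside2]
          case bside2 =>
            intro hcon
            obtain ⟨hi0, h1⟩ := hcon
            subst hi0
            apply hA
            refine ⟨rfl, ?_⟩
            rw [hg0, List.getD_eq_getElem s ' ' (by omega)] at h1
            exact h1
          rw [show PySem.List.pyGetD s ((i:Nat) : Int) ' ' = s[i] from by
            rw [PySem.List.pyGetD_natCast, List.getD_eq_getElem s ' ' hi_n]]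
          cases hdv : PySem.Int.ofChars? [s[i]] with
          | none => simp [pvProcessA]
          | some dv =>
            simp only []
            rw [PySem.List.pySetD_natCast, PySem.List.pySetD_natCast]
            rw [pvAdjGen s i (PySem.Int.toChars (dv - 1)) (by omega)]
            rw [if_neg (show ¬ (2 * ((i : Nat) : Int) = ((s.length : Nat) : Int) - 1)
              from by omega)]
            rw [show PySem.List.slice s none (some ((i : Nat) : Int)) = s.take i from
              PySem.List.slice_to_natCast ..]
            -- apply the fill lemma with u = pvSing (take i) ++ [d], mid = zeros, w = d :: rev
            have hulen : (pvSing (s.take i) ++ [PySem.Int.toChars (dv - 1)]).length = i + 1 := by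
              simp [pvSing]; omega
            have hwlen : (PySem.Int.toChars (dv - 1) :: (pvSing (s.take i)).reverse).length
                = i + 1 := by simp [pvSing]; omega
            rw [← List.append_assoc]
            rw [pvFill_spec' r s.length (pvSing (s.take i) ++ [PySem.Int.toChars (dv - 1)])
              (List.replicate (s.length - 2*i - 2) ['0'])
              (PySem.Int.toChars (dv - 1) :: (pvSing (s.take i)).reverse)
              (i + 1)
              (by rw [hulen, hwlen]; simp only [List.length_replicate]; omega)
              (by rw [hulen])
              (by rw [hulen, hwlen])
              (by simp only [List.length_replicate]; omega)]
            simp only [pvProcessA]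
            congr 1
            rw [pvJoin_eq_flatten]
            simp [pvSing_reverse, pvSing_flatten, List.length_replicate]
            omega
      · rw [if_neg hvm, if_neg hvm]
        exact ih (i+1) (by omega)

lemma pvStep_eq (m : Int) : pvStepA m = pvStepB m := by
  have hs := pvToChars_ne_nil m
  have hlen : (pvSing (PySem.Int.toChars m)).length = (PySem.Int.toChars m).length := by
    simp [pvSing]
  have h0 : pvState (PySem.Int.toChars m) (PySem.Int.toChars m).length 0 =
      List.replicate (PySem.Int.toChars m).length ['0'] := by
    simp [pvState, pvSing]
  have key := pvScan_eq (PySem.Int.toChars m) m hs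
    ((PySem.Int.toChars m).length / 2 + (PySem.Int.toChars m).length % 2) 0 (by omega)
  rw [h0] at key
  show pvProcessA _ = _
  simp only [pvStepB, hlen]
  exact key

lemma pvGo_eq : ∀ (k : Nat) (m : Int), pvGoA k m = pvGoB k m := by
  intro k
  induction k with
  | zero => intro m; rfl
  | succ k ih =>
    intro m
    show pvGoA (k + 1) m = pvGoB (k + 1) m
    by_cases hm : m = 0
    · simp [pvGoA, pvGoB, hm]
    · simp only [pvGoA, pvGoB, if_neg hm, if_pos hm, ne_eq]
      rw [pvStep_eq]
      cases pvStepB m with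
      | none => rfl
      | some p => simp [ih]

-- ===== VERDICT (by name: the statement is the Claim_ definition above) =====
theorem rem_pal_spec : Claim_equal_rem_pal := by
  intro m _ _
  show rem_pal m = rem_pal_alt m
  exact pvGo_eq _ m
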